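-- pv_equiv track=rewrite | github.com/facebookresearch/gismo | baselines/naive_baselines.py | create_lookup_table_frequency
-- ===== SOURCE A (Python) =====
-- def create_lookup_table_frequency(examples):
--     frequencies = {}
--     for example in examples:
--         ing1, ing2 = example
--         if ing2 not in frequencies:
--             frequencies[ing2] = 0
--         frequencies[ing2] += 1
--
--     frequency_list = list(
--         {
--             k: v
--             for k, v in sorted(
--                 frequencies.items(), key=lambda item: item[1], reverse=True
--             )
--         }.keys()
--     )
--     return frequency_list
-- ===== SOURCE B (Python) =====
-- def create_lookup_table_frequency(examples):
--     frequencies = {}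
--     for example in examples:
--         ing1, ing2 = example
--         frequencies[ing2] = frequencies.get(ing2, 0) + 1
--
--     max_count = max(frequencies.values(), default=0)
--     buckets = {}
--     for k, c in frequencies.items():
--         buckets[c] = buckets.get(c, []) + [k]
--
--     result = []
--     for c in range(max_count, 0, -1):
--         result.extend(buckets.get(c, []))
--     return result
-- ===== Notes on version B (the rewrite author's own statement) =====
-- stated objective: alternative
-- what changed: Replaces A's comparison sort of the frequency items (plus rebuilding a dict just to take its keys) by a counting/bucket pass: keys are appended to a bucket per count and buckets are emitted from the highest count down, preserving first-appearance tie order.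
import Mathlib
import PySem

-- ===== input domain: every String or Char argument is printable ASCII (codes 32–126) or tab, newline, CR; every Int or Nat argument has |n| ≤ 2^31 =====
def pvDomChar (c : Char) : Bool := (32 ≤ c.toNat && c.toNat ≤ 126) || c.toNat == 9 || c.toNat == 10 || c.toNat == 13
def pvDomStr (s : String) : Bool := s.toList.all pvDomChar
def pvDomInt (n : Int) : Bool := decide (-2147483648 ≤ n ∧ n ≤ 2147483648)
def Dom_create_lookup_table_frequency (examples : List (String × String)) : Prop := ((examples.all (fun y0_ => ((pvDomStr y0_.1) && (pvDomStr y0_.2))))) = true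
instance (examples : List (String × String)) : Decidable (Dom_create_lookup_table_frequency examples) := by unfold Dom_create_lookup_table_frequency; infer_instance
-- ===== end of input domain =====

-- B replaces A's comparison sort of the frequency items by a counting/bucket pass over the
-- counts (objective: alternative algorithm; same descending-by-frequency, first-appearance tie order).

-- ===== PORT A =====
def create_lookup_table_frequency (examples : List (String × String)) : List String :=
  -- frequencies = {}; for example in examples: ing1, ing2 = example; if ing2 not in frequencies: …; frequencies[ing2] += 1
  let frequencies : PySem.Dict String Int :=
    examples.foldl (fun d ex =>
      let d' := if d.contains ex.2 then d else d.insert ex.2 0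
      d'.insert ex.2 (d'.getD ex.2 0 + 1)) PySem.Dict.empty
  -- list({k: v for k, v in sorted(frequencies.items(), key=item[1], reverse=True)}.keys())
  let sortedItems := PySem.List.sorted frequencies.items (fun item => item.2) true
  let rebuilt : PySem.Dict String Int :=
    sortedItems.foldl (fun d kv => d.insert kv.1 kv.2) PySem.Dict.empty
  rebuilt.keys

-- ===== PORT B =====
def create_lookup_table_frequency_alt (examples : List (String × String)) : List String :=
  -- frequencies[ing2] = frequencies.get(ing2, 0) + 1
  let frequencies : PySem.Dict String Int :=
    examples.foldl (fun d ex => d.insert ex.2 (d.getD ex.2 0 + 1)) PySem.Dict.empty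
  -- max_count = max(frequencies.values(), default=0)
  let maxCount : Int := PySem.List.maxD frequencies.values (fun v => v) 0
  -- buckets[c] = buckets.get(c, []) + [k]
  let buckets : PySem.Dict Int (List String) :=
    frequencies.items.foldl (fun d p => d.modify p.2 [] (fun b => b ++ [p.1])) PySem.Dict.empty
  -- for c in range(max_count, 0, -1): result.extend(buckets.get(c, []))
  (PySem.List.pyRange maxCount 0 (-1)).foldl (fun result c => result ++ buckets.getD c []) []

-- ===== PRECONDITION & SPEC =====
def Spec_create_lookup_table_frequency (examples : List (String × String)) (out : List String) : Prop := out = create_lookup_table_frequency_alt examples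
instance (examples : List (String × String)) (out : List String) : Decidable (Spec_create_lookup_table_frequency examples out) := by unfold Spec_create_lookup_table_frequency; infer_instance

-- ===== CLAIM (what is proved, stated in full; the proofs are below) =====
def Claim_equal_create_lookup_table_frequency : Prop := ∀ (examples : List (String × String)), Dom_create_lookup_table_frequency examples → Spec_create_lookup_table_frequency examples (create_lookup_table_frequency examples)

-- ===== LEMMAS AND PROOFS =====

-- A's guarded counting step equals B's get-based counting step.
lemma pv_bodyA_eq :
    (fun (d : PySem.Dict String Int) (ex : String × String) =>
      let d' := if d.contains ex.2 then d else d.insert ex.2 0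
      d'.insert ex.2 (d'.getD ex.2 0 + 1))
    = fun d ex => d.insert ex.2 (d.getD ex.2 0 + 1) := by
  funext d ex
  by_cases h : d.contains ex.2 = true
  · simp [h]
  · have h' : d.contains ex.2 = false := by simpa using h
    rw [PySem.Dict.getD_of_not_contains d (0:Int) h']
    simp [h', PySem.Dict.getD_insert_self, PySem.Dict.insert_insert_self]

-- insertBy passes over a prefix it is not inserted before.
lemma pv_insertBy_skip {α : Type} (before : α → α → Bool) (x : α) :
    ∀ (as bs : List α), (∀ a ∈ as, before x a = false) →
      PySem.List.insertBy before x (as ++ bs) = as ++ PySem.List.insertBy before x bs := by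
  intro as
  induction as with
  | nil => intro bs _; simp
  | cons a as ih =>
      intro bs h
      simp only [List.cons_append, PySem.List.insertBy, h a (by simp)]
      simp only [Bool.false_eq_true, if_false, List.cons.injEq, true_and]
      exact ih bs (fun y hy => h y (by simp [hy]))

-- insertBy puts x in front when it goes before everything.
lemma pv_insertBy_front {α : Type} (before : α → α → Bool) (x : α) (ys : List α)
    (h : ∀ y ∈ ys, before x y = true) :
    PySem.List.insertBy before x ys = x :: ys := by
  cases ys with
  | nil => rfl
  | cons y ys => simp [PySem.List.insertBy, h y (by simp)]

-- Inserting x into a bucket-concatenated list appends it to its own bucket.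
lemma pv_insert_bucket {α : Type} (key : α → Int) (x : α) :
    ∀ (cs : List Int) (buck : Int → List α), cs.Pairwise (· > ·) →
      (∀ c ∈ cs, ∀ a ∈ buck c, key a = c) → key x ∈ cs →
      PySem.List.insertBy (fun a b => decide (key b < key a)) x (cs.flatMap buck)
        = cs.flatMap (fun c => buck c ++ if key x = c then [x] else []) := by
  intro cs
  induction cs with
  | nil => intro buck _ _ hx; simp at hx
  | cons c cs ih =>
      intro buck hpw hb hx
      have hpw' := (List.pairwise_cons.mp hpw)
      simp only [List.flatMap_cons]
      by_cases hxc : key x = c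
      · have hskip : ∀ a ∈ buck c, (fun a b => decide (key b < key a)) x a = false := by
          intro a ha
          have : key a = c := hb c (by simp) a ha
          simp [this, hxc]
        rw [pv_insertBy_skip _ x (buck c) (cs.flatMap buck) hskip]
        have hfront : ∀ y ∈ cs.flatMap buck, (fun a b => decide (key b < key a)) x y = true := by
          intro y hy
          rcases List.mem_flatMap.mp hy with ⟨c', hc', hy'⟩
          have : key y = c' := hb c' (by simp [hc']) y hy'
          have : key y < key x := by
            have := hpw'.1 c' hc'
            omega
          simpa using this
        rw [pv_insertBy_front _ x _ hfront]
        have htail : cs.flatMap (fun c' => buck c' ++ if key x = c' then [x] else [])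
            = cs.flatMap buck := by
          apply List.flatMap_congr
          intro c' hc'
          have : key x ≠ c' := by have := hpw'.1 c' hc'; omega
          simp [this]
        rw [htail, if_pos hxc]
        simp
      · have hx' : key x ∈ cs := by
          rcases List.mem_cons.mp hx with h | h
          · exact absurd h hxc
          · exact h
        have hskip : ∀ a ∈ buck c, (fun a b => decide (key b < key a)) x a = false := by
          intro a ha
          have hkc : key a = c := hb c (by simp) a ha
          have : c > key x := hpw'.1 _ hx'
          simp [hkc]; omega
        rw [pv_insertBy_skip _ x (buck c) (cs.flatMap buck) hskip]
        rw [ih buck hpw'.2 (fun c' hc' => hb c' (by simp [hc'])) hx']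
        rw [if_neg hxc]
        simp
-- Python's stable descending sort by an Int key equals bucket concatenation over any
-- strictly decreasing list of counts covering all keys.
lemma pv_sorted_desc_buckets {α : Type} (key : α → Int) (l : List α) (cs : List Int)
    (hpw : cs.Pairwise (· > ·)) (hall : ∀ a ∈ l, key a ∈ cs) :
    PySem.List.sorted l key true = cs.flatMap (fun c => l.filter (fun a => key a == c)) := by
  induction l using List.reverseRecOn with
  | nil => simp [PySem.List.sorted_rev_eq_foldl_insertBy]
  | append_singleton l x ih =>
      rw [PySem.List.sorted_rev_eq_foldl_insertBy, List.foldl_append, List.foldl_cons,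
        List.foldl_nil, ← PySem.List.sorted_rev_eq_foldl_insertBy]
      rw [ih (fun a ha => hall a (by simp [ha]))]
      rw [pv_insert_bucket key x cs (fun c => l.filter (fun a => key a == c)) hpw
        (by intro c _ a ha
            have := List.mem_filter.mp ha
            exact beq_iff_eq.mp this.2)
        (hall x (by simp))]
      apply List.flatMap_congr
      intro c _
      rw [List.filter_append]
      by_cases h : key x = c <;> simp [h]

-- range(m, 0, -1) as a mapped range.
lemma pv_pyRange_down (m : Int) :
    PySem.List.pyRange m 0 (-1) = List.map (fun k : Nat => m - (k : Int)) (List.range m.toNat) := by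
  have h1 : ¬ ((-1:Int) = 0) := by norm_num
  have h2 : ¬ ((0:Int) < -1) := by norm_num
  simp only [PySem.List.pyRange, if_neg h1, if_neg h2]
  by_cases h : (0:Int) < m
  · rw [if_pos h]
    have hc : ((m - 0 + -(-1) - 1) / -(-1) : Int) = m := by norm_num
    rw [hc]
    apply List.map_congr_left
    intro k _
    ring
  · rw [if_neg h]
    have : m.toNat = 0 := by omega
    simp [this]

lemma pv_mem_pyRange_down (m c : Int) :
    c ∈ PySem.List.pyRange m 0 (-1) ↔ 1 ≤ c ∧ c ≤ m := by
  rw [pv_pyRange_down]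
  constructor
  · intro h
    rcases List.mem_map.mp h with ⟨k, hk, rfl⟩
    rw [List.mem_range] at hk
    omega
  · intro h
    refine List.mem_map.mpr ⟨(m - c).toNat, ?_, by omega⟩
    rw [List.mem_range]
    omega

lemma pv_pyRange_down_pairwise (m : Int) :
    (PySem.List.pyRange m 0 (-1)).Pairwise (· > ·) := by
  rw [pv_pyRange_down]
  rw [List.pairwise_map]
  exact List.pairwise_lt_range.imp (fun {a b} h => by omega)

-- Both counting loops build Counter(examples.map(second)).
lemma pv_freq_counter (examples : List (String × String)) :
    examples.foldl (fun d ex => d.insert ex.2 (d.getD ex.2 0 + 1)) PySem.Dict.empty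
      = PySem.Dict.counter (examples.map (fun e => e.2)) := by
  rw [← PySem.Dict.foldl_insert_getD_add_one_eq_counter, List.foldl_map]

-- A computes the first projections of the stably reverse-sorted counter items.
lemma pv_A_eq (examples : List (String × String)) :
    create_lookup_table_frequency examples
      = (PySem.List.sorted (PySem.Dict.counter (examples.map (fun e => e.2))).items
          (fun item => item.2) true).map (fun p => p.1) := by
  unfold create_lookup_table_frequency
  dsimp only
  rw [pv_bodyA_eq, pv_freq_counter]
  set items := (PySem.Dict.counter (examples.map (fun e => e.2))).items with hitems
  set s := PySem.List.sorted items (fun item => item.2) true with hs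
  have hfresh : ∀ a ∈ s, (PySem.Dict.empty : PySem.Dict String Int).contains a.1 = false := by
    intro a _; simp [PySem.Dict.contains_empty]
  have hnodup : (s.map (fun p => p.1)).Nodup := by
    have hperm : s.Perm items := PySem.List.sorted_perm items (fun item => item.2) true
    have := (hperm.map (fun p => p.1)).nodup_iff.mpr
      (by simpa [PySem.Dict.keys] using PySem.Dict.nodup_keys_counter (examples.map (fun e => e.2)))
    exact this
  have := PySem.Dict.items_foldl_insert_fresh s (fun p => p.1) (fun p => p.2)
    PySem.Dict.empty hfresh hnodup
  simp only [PySem.Dict.keys, this]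
  simp
  rfl

-- B computes the bucket concatenation over range(max_count, 0, -1).
lemma pv_B_eq (examples : List (String × String)) :
    create_lookup_table_frequency_alt examples
      = (PySem.List.pyRange
          (PySem.List.maxD (PySem.Dict.counter (examples.map (fun e => e.2))).values (fun v => v) 0)
          0 (-1)).flatMap
          (fun c => ((PySem.Dict.counter (examples.map (fun e => e.2))).items.filter
            (fun p => p.2 == c)).map (fun p => p.1)) := by
  unfold create_lookup_table_frequency_alt
  dsimp only
  rw [pv_freq_counter]
  set items := (PySem.Dict.counter (examples.map (fun e => e.2))).items with hitems
  have hbuck : ∀ c : Int,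
      (items.foldl (fun d p => d.modify p.2 [] (fun b => b ++ [p.1])) PySem.Dict.empty).getD c []
        = (items.filter (fun p => p.2 == c)).map (fun p => p.1) := by
    intro c
    have hswap : (items.map (fun p : String × Int => (p.2, p.1))).foldl
        (fun d q => d.modify q.1 [] (fun b => b ++ [q.2])) PySem.Dict.empty
        = items.foldl (fun d p => d.modify p.2 [] (fun b => b ++ [p.1])) PySem.Dict.empty := by
      rw [List.foldl_map]
    rw [← hswap, PySem.Dict.getD_foldl_modify_append]
    simp [List.filter_map, Function.comp_def]
  rw [PySem.List.foldl_append_eq_flatMap]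
  simp only [List.nil_append]
  exact List.flatMap_congr (fun c _ => hbuck c)

-- Every counter item's count lies in [1, max_count].
lemma pv_count_bounds (examples : List (String × String)) :
    ∀ a ∈ (PySem.Dict.counter (examples.map (fun e => e.2))).items,
      a.2 ∈ PySem.List.pyRange
        (PySem.List.maxD (PySem.Dict.counter (examples.map (fun e => e.2))).values (fun v => v) 0)
        0 (-1) := by
  intro a ha
  set vals := examples.map (fun e => e.2) with hvals
  rw [pv_mem_pyRange_down]
  constructor
  · rw [PySem.Dict.items_counter] at ha
    rcases List.mem_map.mp ha with ⟨k, hk, rfl⟩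
    have : k ∈ vals := (PySem.Set.mem_ofList vals k).mp hk
    have := List.count_pos_iff.mpr this
    simp only []
    omega
  · have hv : a.2 ∈ (PySem.Dict.counter vals).values := by
      simp only [PySem.Dict.values]
      exact List.mem_map.mpr ⟨a, ha, rfl⟩
    unfold PySem.List.maxD
    cases hmax : PySem.List.max? (PySem.Dict.counter vals).values (fun v => v) with
    | none =>
        rw [(PySem.List.max?_eq_none_iff _ _).mp hmax] at hv
        simp at hv
    | some m =>
        have := PySem.List.max?_isMax hmax a.2 hv
        simpa using this

-- ===== VERDICT (by name: the statement is the Claim_ definition above) =====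
theorem create_lookup_table_frequency_spec : Claim_equal_create_lookup_table_frequency := by
  intro examples _
  unfold Spec_create_lookup_table_frequency
  rw [pv_A_eq, pv_B_eq]
  rw [pv_sorted_desc_buckets (fun p => p.2)
    (PySem.Dict.counter (examples.map (fun e => e.2))).items
    (PySem.List.pyRange
      (PySem.List.maxD (PySem.Dict.counter (examples.map (fun e => e.2))).values (fun v => v) 0)
      0 (-1))
    (pv_pyRange_down_pairwise _) (pv_count_bounds examples)]
  rw [List.map_flatMap]
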